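-- pv_equiv track=rewrite | github.com/vinchinzu/euler | python/378.py | dT
-- ===== SOURCE A (Python) =====
-- from typing import Dict, List
--
-- def factor_with_spf(num: int, spf: List[int]) -> Dict[int, int]:
--     """Factor `num` into prime powers using a smallest-prime-factor table.
--
--     Returns a dict {prime: exponent}. For num <= 1, returns an empty dict.
--     """
--
--     if num <= 1:
--         return {}
--
--     factors: Dict[int, int] = {}
--     while num > 1:
--         p = spf[num]
--         exp = 0
--         while num % p == 0:
--             exp += 1
--             num //= p
--         factors[p] = factors.get(p, 0) + exp
--     return factors
--
-- def dT(n: int, spf: List[int]) -> int: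
--     """Return dT(n): number of divisors of the nth triangle number T(n).
--
--     Uses the relation T(n) = n(n + 1) / 2 and a precomputed SPF table.
--     """
--
--     if n <= 1:
--         return 1
--
--     factors_n = factor_with_spf(n, spf)
--     factors_np1 = factor_with_spf(n + 1, spf)
--
--     # Combine exponents for n and n+1.
--     factors: Dict[int, int] = dict(factors_n)
--     for p, e in factors_np1.items():
--         factors[p] = factors.get(p, 0) + e
--
--     # Divide by 2 (remove one factor of 2 from the product).
--     if 2 in factors:
--         factors[2] -= 1
--         if factors[2] == 0:
--             del factors[2]
--
--     result = 1
--     for exp in factors.values():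
--         result *= exp + 1
--     return result
-- ===== SOURCE B (Python) =====
-- def _divisor_count(m, spf):
--     """Number of divisors of m (m >= 1), via the SPF table; 1 for m <= 1."""
--     count = 1
--     while m > 1:
--         p = spf[m]
--         e = 0
--         while m % p == 0:
--             e += 1
--             m //= p
--         count *= e + 1
--     return count
--
-- def dT(n, spf):
--     if n <= 1:
--         return 1
--     # T(n) = a * b with a, b coprime; d(a*b) = d(a) * d(b).
--     if n % 2 == 0:
--         a, b = n // 2, n + 1
--     else:
--         a, b = n, (n + 1) // 2
--     return _divisor_count(a, spf) * _divisor_count(b, spf)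
-- ===== Notes on version B (the rewrite author's own statement) =====
-- stated objective: alternative
-- what changed: B splits T(n)=n(n+1)/2 into the coprime pair (n//2, n+1) or (n, (n+1)//2) and multiplies the two divisor counts accumulated as plain integers, instead of A's building two factor dicts, merging them and removing one factor of 2 before multiplying exponents.
-- outside the precondition, e.g. on dT(16, [0, 1, 2, 3, 4, 5, 6, 7, 8, 9, 10, 11, 12, 13, 14, 15, 4, 17]): A returns 6, B returns 4
import Mathlib
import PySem

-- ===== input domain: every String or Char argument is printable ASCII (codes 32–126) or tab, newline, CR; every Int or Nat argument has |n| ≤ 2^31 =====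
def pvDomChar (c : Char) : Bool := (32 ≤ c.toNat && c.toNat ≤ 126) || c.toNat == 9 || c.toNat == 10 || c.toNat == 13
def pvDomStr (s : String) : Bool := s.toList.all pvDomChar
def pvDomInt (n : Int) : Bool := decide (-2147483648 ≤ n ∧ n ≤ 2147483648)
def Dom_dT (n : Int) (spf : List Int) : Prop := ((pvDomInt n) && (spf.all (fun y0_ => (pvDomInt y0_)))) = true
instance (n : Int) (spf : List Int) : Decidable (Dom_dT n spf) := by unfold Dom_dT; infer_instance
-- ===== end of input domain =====

-- B replaces A's merge-two-factor-dicts-and-remove-a-2 computation by splitting T(n)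
-- into the two coprime factors (n/2, n+1) or (n, (n+1)/2) and multiplying their
-- divisor counts, accumulating each count as a plain integer (no dicts).

-- ===== PORT A =====
-- inner `while num % p == 0` loop of factor_with_spf (fuel makes it total;
-- fuel only runs out where the Python loop would not terminate, outside Pre_)
def aDivLoop : Nat → Int → Int → Int → Int × Int
  | 0, _, num, exp => (num, exp)
  | fuel + 1, p, num, exp =>
    if p ≠ 0 ∧ PySem.Int.mod num p = 0 then
      aDivLoop fuel p (PySem.Int.floordiv num p) (exp + 1)
    else (num, exp)

-- outer `while num > 1` loop of factor_with_spf
def aFactorGo : Nat → Int → PySem.Dict Int Int → List Int → PySem.Dict Int Int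
  | 0, _, d, _ => d
  | fuel + 1, num, d, spf =>
    if 1 < num then
      match PySem.List.pyGet? spf num with
      | none => d  -- Python raises IndexError here (excluded by Pre_)
      | some p =>
        let r := aDivLoop num.toNat p num 0
        aFactorGo fuel r.1 (d.insert p (d.getD p 0 + r.2)) spf
    else d

def factorWithSpf (num : Int) (spf : List Int) : PySem.Dict Int Int :=
  if num ≤ 1 then PySem.Dict.empty else aFactorGo num.toNat num PySem.Dict.empty spf

def dT (n : Int) (spf : List Int) : Int :=
  if n ≤ 1 then 1
  else
    let factorsN := factorWithSpf n spf
    let factorsNp1 := factorWithSpf (n + 1) spf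
    let merged := factorsNp1.items.foldl
      (fun d pe => d.insert pe.1 (d.getD pe.1 0 + pe.2)) factorsN
    let adj :=
      if merged.contains 2 then
        let m1 := merged.modify 2 0 (fun v => v - 1)
        if m1.getD 2 0 = 0 then m1.erase 2 else m1
      else merged
    adj.values.foldl (fun r e => r * (e + 1)) 1

-- ===== PORT B =====
-- inner `while m % p == 0` loop of _divisor_count (same totalising fuel)
def bDivLoop : Nat → Int → Int → Int → Int × Int
  | 0, _, m, e => (m, e)
  | fuel + 1, p, m, e =>
    if p ≠ 0 ∧ PySem.Int.mod m p = 0 then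
      bDivLoop fuel p (PySem.Int.floordiv m p) (e + 1)
    else (m, e)

-- `while m > 1` loop of _divisor_count, accumulating the count
def bCountGo : Nat → Int → List Int → Int → Int
  | 0, _, _, count => count
  | fuel + 1, m, spf, count =>
    if 1 < m then
      match PySem.List.pyGet? spf m with
      | none => count  -- Python raises IndexError here (excluded by Pre_)
      | some p =>
        let r := bDivLoop m.toNat p m 0
        bCountGo fuel r.1 spf (count * (r.2 + 1))
    else count

def divisorCountB (m : Int) (spf : List Int) : Int := bCountGo m.toNat m spf 1

def dT_alt (n : Int) (spf : List Int) : Int :=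
  if n ≤ 1 then 1
  else if PySem.Int.mod n 2 = 0 then
    divisorCountB (PySem.Int.floordiv n 2) spf * divisorCountB (n + 1) spf
  else
    divisorCountB n spf * divisorCountB (PySem.Int.floordiv (n + 1) 2) spf

-- ===== PRECONDITION & SPEC =====
-- Pre_ excludes (for n ≥ 2 only) malformed SPF tables: tables that are too short
-- (A raises IndexError), or whose entry at some index i ∈ [2, n+1] is not a prime
-- divisor ≥ 2 of i (A then diverges, raises, or returns an accidental value of the
-- dict-merge that does not count divisors of T(n)).
def Pre_dT (n : Int) (spf : List Int) : Prop :=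
  n ≤ 1 ∨ (n.toNat + 2 ≤ spf.length ∧ ∀ i : Nat, i < n.toNat + 2 → 2 ≤ i →
    2 ≤ spf.getD i 0 ∧ spf.getD i 0 ∣ (i : Int) ∧ (spf.getD i 0).toNat.Prime)
instance (n : Int) (spf : List Int) : Decidable (Pre_dT n spf) := by unfold Pre_dT; infer_instance

def pvWitness_dT : Int × List Int := (3, [0, 0, 2, 3, 2, 5])

def Spec_dT (n : Int) (spf : List Int) (out : Int) : Prop := out = dT_alt n spf
instance (n : Int) (spf : List Int) (out : Int) : Decidable (Spec_dT n spf out) := by unfold Spec_dT; infer_instance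

-- ===== CLAIM (what is proved, stated in full; the proofs are below) =====
def Claim_equal_dT : Prop := ∀ (n : Int) (spf : List Int), Dom_dT n spf → Pre_dT n spf → Spec_dT n spf (dT n spf)

-- ===== LEMMAS AND PROOFS =====

-- the SPF table is valid on all indices 2..N
def GoodSpf (N : Nat) (spf : List Int) : Prop :=
  ∀ i : Nat, 2 ≤ i → i ≤ N →
    i < spf.length ∧ 2 ≤ spf.getD i 0 ∧ spf.getD i 0 ∣ (i : Int) ∧ (spf.getD i 0).toNat.Prime

theorem aDivLoop_spec (p : ℕ) (hp : p.Prime) :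
    ∀ (f m : ℕ) (e : Int), 1 ≤ m → m ≤ f →
      aDivLoop f (p : Int) (m : Int) e
        = (((m / p ^ m.factorization p : ℕ) : Int), e + ((m.factorization p : ℕ) : Int)) := by
  intro f
  induction f with
  | zero => intro m e h1 hf; omega
  | succ f ih =>
    intro m e h1 hf
    have hppos : 0 < p := hp.pos
    have hp0 : (p : Int) ≠ 0 := by exact_mod_cast hp.ne_zero
    by_cases hdvd : p ∣ m
    · have hm0 : m % p = 0 := Nat.mod_eq_zero_of_dvd hdvd
      have hmod : PySem.Int.mod (m : Int) (p : Int) = 0 := by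
        rw [PySem.Int.mod_natCast, hm0]; simp
      have hple : p ≤ m := Nat.le_of_dvd (by omega) hdvd
      have hlt : m / p < m := Nat.div_lt_self (by omega) hp.one_lt
      have h1' : 1 ≤ m / p := (Nat.one_le_div_iff hppos).mpr hple
      have hfp : 0 < m.factorization p := hp.factorization_pos_of_dvd (by omega) hdvd
      obtain ⟨k, hk⟩ : ∃ k, m.factorization p = k + 1 := ⟨m.factorization p - 1, by omega⟩
      have hkey : (m / p).factorization p = k := by
        rw [Nat.factorization_div hdvd]
        simp [hp.factorization_self, hk]
      have step : aDivLoop (f + 1) (p : Int) (m : Int) e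
          = aDivLoop f (p : Int) (PySem.Int.floordiv (m : Int) (p : Int)) (e + 1) := by
        simp only [aDivLoop]
        rw [if_pos ⟨hp0, hmod⟩]
      rw [step, show PySem.Int.floordiv (m : Int) (p : Int) = ((m / p : ℕ) : Int) from
        PySem.Int.floordiv_natCast m p, ih (m / p) (e + 1) h1' (by omega), hkey, hk]
      have hdivs : m / p / p ^ k = m / p ^ (k + 1) := by
        rw [Nat.div_div_eq_div_mul, ← pow_succ']
      rw [hdivs]
      refine Prod.ext rfl ?_
      push_cast
      ring
    · have hm0 : m % p ≠ 0 := fun h => hdvd (Nat.dvd_of_mod_eq_zero h)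
      have hmod : ¬ PySem.Int.mod (m : Int) (p : Int) = 0 := by
        rw [PySem.Int.mod_natCast]
        exact_mod_cast hm0
      rw [Nat.factorization_eq_zero_of_not_dvd hdvd]
      simp only [aDivLoop]
      rw [if_neg (fun h => hmod h.2)]
      simp

theorem bDivLoop_eq_aDivLoop : ∀ (f : ℕ) (p num e : Int),
    bDivLoop f p num e = aDivLoop f p num e := by
  intro f
  induction f with
  | zero => intro p num e; rfl
  | succ f ih =>
    intro p num e
    simp only [bDivLoop, aDivLoop]
    split
    · exact ih _ _ _
    · rfl

theorem aFactorGo_spec (N : ℕ) (spf : List Int) (hg : GoodSpf N spf) :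
    ∀ (f m : ℕ) (d : PySem.Dict Int Int), 1 ≤ m → m ≤ N → m ≤ f →
      (∀ q : ℕ, 2 ≤ q → q ∣ m → ((q : ℕ) : Int) ∉ d.keys) →
      ∃ t : List (Int × Int),
        (aFactorGo f (m : Int) d spf).items = d.items ++ t ∧
        (∀ pe ∈ t, ∃ q : ℕ, q.Prime ∧ pe.1 = (q : Int) ∧
            pe.2 = (m.factorization q : Int) ∧ 0 < m.factorization q) ∧
        (∀ q : ℕ, q.Prime → q ∣ m → ((q : ℕ) : Int) ∈ t.map Prod.fst) ∧
        (t.map Prod.fst).Nodup := by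
  intro f
  induction f with
  | zero => intro m d h1 hN hf _; omega
  | succ f ih =>
    intro m d h1 hN hf hfree
    by_cases hm : m = 1
    · subst hm
      refine ⟨[], by simp [aFactorGo], by simp, ?_, by simp⟩
      intro q hq hdvd
      exact absurd (Nat.dvd_one.mp hdvd) hq.ne_one
    · have hm2 : 2 ≤ m := by omega
      obtain ⟨hlen, hge2, hdvdI, hprime⟩ := hg m hm2 hN
      have hcond : (1 : Int) < (m : Int) := by omega
      have hget : PySem.List.pyGet? spf ((m : ℕ) : Int) = some (spf.getD m 0) := by
        rw [PySem.List.pyGet?_natCast, List.getElem?_eq_getElem hlen,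
          List.getD_eq_getElem spf 0 hlen]
      set p := (spf.getD m 0).toNat with hpdef
      have hp0cast : spf.getD m 0 = (p : Int) := (Int.toNat_of_nonneg (by omega)).symm
      have hprime' : p.Prime := hprime
      have hpdvd : p ∣ m := by
        have : (p : Int) ∣ (m : Int) := hp0cast ▸ hdvdI
        exact_mod_cast this
      set v := m.factorization p with hvdef
      set m' := m / p ^ v with hm'def
      have hstep : aFactorGo (f + 1) (m : Int) d spf
          = aFactorGo f (m' : Int) (d.insert (p : Int) (d.getD (p : Int) 0 + (v : Int))) spf := by
        simp only [aFactorGo]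
        rw [if_pos hcond, hget, hp0cast]
        simp only [Int.toNat_natCast, aDivLoop_spec p hprime' m m 0 h1 le_rfl, zero_add]
        rfl
      have hpkeys : ((p : ℕ) : Int) ∉ d.keys := hfree p hprime'.two_le hpdvd
      have hcont : d.contains (p : Int) = false := by
        cases hc : d.contains (p : Int) with
        | false => rfl
        | true => exact absurd ((PySem.Dict.contains_iff_mem_keys d _).mp hc) hpkeys
      have hitems : (d.insert (p : Int) (d.getD (p : Int) 0 + (v : Int))).items
          = d.items ++ [((p : Int), (v : Int))] := by
        rw [PySem.Dict.getD_of_not_contains d 0 hcont, zero_add,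
          PySem.Dict.items_insert_of_not_contains d _ hcont]
      have hm'1 : 1 ≤ m' := Nat.ordCompl_pos p (by omega)
      have hm'N : m' ≤ N := le_trans (Nat.div_le_self _ _) hN
      have hvpos : 0 < v := hprime'.factorization_pos_of_dvd (by omega) hpdvd
      have hm'lt : m' < m := by
        have h2v : 1 < p ^ v :=
          lt_of_lt_of_le hprime'.one_lt (Nat.le_self_pow (by omega) p)
        exact Nat.div_lt_self (by omega) h2v
      have hndvd : ¬ p ∣ m' := Nat.not_dvd_ordCompl hprime' (by omega)
      have hfactm' : ∀ q : ℕ, q ≠ p → m'.factorization q = m.factorization q := by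
        intro q hq
        rw [hm'def, hvdef, Nat.factorization_ordCompl]
        exact Finsupp.erase_ne hq
      have hfree' : ∀ q : ℕ, 2 ≤ q → q ∣ m' →
          ((q : ℕ) : Int) ∉ (d.insert (p : Int) (d.getD (p : Int) 0 + (v : Int))).keys := by
        intro q hq2 hqdvd hmem
        rcases (PySem.Dict.mem_keys_insert d _ _ _).mp hmem with h | h
        · have hqp : q = p := by exact_mod_cast h
          exact hndvd (hqp ▸ hqdvd)
        · exact hfree q hq2 (hqdvd.trans (Nat.ordCompl_dvd m p)) h
      obtain ⟨t', ht'items, ht'ent, ht'cov, ht'nd⟩ := ih m' _ hm'1 hm'N (by omega) hfree'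
      refine ⟨((p : Int), (v : Int)) :: t', ?_, ?_, ?_, ?_⟩
      · rw [hstep, ht'items, hitems]
        simp
      · rintro pe hpe
        rcases List.mem_cons.mp hpe with rfl | hpe'
        · exact ⟨p, hprime', rfl, rfl, hvpos⟩
        · obtain ⟨q, hq, h1q, h2q, h3q⟩ := ht'ent pe hpe'
          have hqm' : q ∣ m' := Nat.dvd_of_factorization_pos (by omega)
          have hqp : q ≠ p := fun h => hndvd (h ▸ hqm')
          have heq : m'.factorization q = m.factorization q := hfactm' q hqp
          exact ⟨q, hq, h1q, by rw [h2q, heq], by rw [← heq]; exact h3q⟩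
      · intro q hq hqm
        by_cases hqp : q = p
        · subst hqp
          simp
        · have hqnd : ¬ p ∣ q := fun hpq =>
            hqp ((Nat.prime_dvd_prime_iff_eq hprime' hq).mp hpq).symm
          have hqm' : q ∣ m' := Nat.dvd_ordCompl_of_dvd_not_dvd hqm hqnd
          have := ht'cov q hq hqm'
          simp [this]
      · simp only [List.map_cons, List.nodup_cons]
        refine ⟨?_, ht'nd⟩
        intro hmem
        obtain ⟨pe, hpe, hf⟩ := List.mem_map.mp hmem
        obtain ⟨q, hq, h1q, h2q, h3q⟩ := ht'ent pe hpe
        have hqp : q = p := by rw [h1q] at hf; exact_mod_cast hf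
        exact hndvd (hqp ▸ Nat.dvd_of_factorization_pos (n := m') (p := q) (by omega))

theorem bCountGo_spec (N : ℕ) (spf : List Int) (hg : GoodSpf N spf) :
    ∀ (f m : ℕ) (c : Int), 1 ≤ m → m ≤ N → m ≤ f →
      bCountGo f (m : Int) spf c = c * ((m.divisors.card : ℕ) : Int) := by
  intro f
  induction f with
  | zero => intro m c h1 hf; omega
  | succ f ih =>
    intro m c h1 hN hf
    by_cases hm : m = 1
    · subst hm
      simp [bCountGo, Nat.divisors_one]
    · have hm2 : 2 ≤ m := by omega
      obtain ⟨hlen, hge2, hdvdI, hprime⟩ := hg m hm2 hN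
      have hcond : (1 : Int) < (m : Int) := by omega
      have hget : PySem.List.pyGet? spf ((m : ℕ) : Int) = some (spf.getD m 0) := by
        rw [PySem.List.pyGet?_natCast, List.getElem?_eq_getElem hlen,
          List.getD_eq_getElem spf 0 hlen]
      set p := (spf.getD m 0).toNat with hpdef
      have hp0cast : spf.getD m 0 = (p : Int) := (Int.toNat_of_nonneg (by omega)).symm
      have hprime' : p.Prime := hprime
      have hpdvd : p ∣ m := by
        have : (p : Int) ∣ (m : Int) := hp0cast ▸ hdvdI
        exact_mod_cast this
      set v := m.factorization p with hvdef
      set m' := m / p ^ v with hm'def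
      have hstep : bCountGo (f + 1) (m : Int) spf c
          = bCountGo f (m' : Int) spf (c * ((v : Int) + 1)) := by
        simp only [bCountGo]
        rw [if_pos hcond, hget, hp0cast]
        simp only [Int.toNat_natCast, bDivLoop_eq_aDivLoop,
          aDivLoop_spec p hprime' m m 0 h1 le_rfl, zero_add]
        rfl
      have hm'1 : 1 ≤ m' := Nat.ordCompl_pos p (by omega)
      have hm'N : m' ≤ N := le_trans (Nat.div_le_self _ _) hN
      have hvpos : 0 < v := hprime'.factorization_pos_of_dvd (by omega) hpdvd
      have hm'lt : m' < m := by
        have h2v : 1 < p ^ v :=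
          lt_of_lt_of_le hprime'.one_lt (Nat.le_self_pow (by omega) p)
        exact Nat.div_lt_self (by omega) h2v
      rw [hstep, ih m' (c * ((v : Int) + 1)) hm'1 hm'N (by omega)]
      have hcop : Nat.Coprime (p ^ v) m' := (Nat.coprime_ordCompl hprime' (by omega)).pow_left v
      have hmm : p ^ v * m' = m := Nat.ordProj_mul_ordCompl_eq_self m p
      have hcardpp : (p ^ v).divisors.card = v + 1 := by
        rw [Nat.divisors_prime_pow hprime', Finset.card_map, Finset.card_range]
      have hcard : m.divisors.card = (v + 1) * m'.divisors.card := by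
        rw [← hmm, Nat.Coprime.card_divisors_mul hcop, hcardpp]
      rw [hcard]
      push_cast
      ring

theorem merge_items : ∀ (l : List (Int × Int)) (d : PySem.Dict Int Int),
    (∀ pe ∈ l, d.contains pe.1 = false) → (l.map Prod.fst).Nodup →
    (l.foldl (fun d pe => d.insert pe.1 (d.getD pe.1 0 + pe.2)) d).items = d.items ++ l := by
  intro l
  induction l with
  | nil => intro d _ _; simp
  | cons pe l ih =>
    intro d hfresh hnd
    have hc : d.contains pe.1 = false := hfresh pe (by simp)
    have hg0 : d.getD pe.1 0 = 0 := PySem.Dict.getD_of_not_contains d 0 hc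
    simp only [List.foldl_cons, hg0, zero_add]
    rw [ih (d.insert pe.1 pe.2) ?_ (by simpa using hnd.of_cons)]
    · rw [PySem.Dict.items_insert_of_not_contains d pe.2 hc]
      simp
    · intro qe hqe
      rw [PySem.Dict.contains_insert]
      have h1 : qe.1 ≠ pe.1 := by
        simp only [List.map_cons, List.nodup_cons] at hnd
        intro hc2
        exact hnd.1 (hc2 ▸ List.mem_map_of_mem (f := Prod.fst) hqe)
      simp [h1, hfresh qe (by simp [hqe])]

theorem prod_foldl : ∀ (l : List Int) (c : Int),
    l.foldl (fun r e => r * (e + 1)) c = c * (l.map (fun e => e + 1)).prod := by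
  intro l
  induction l with
  | nil => intro c; simp
  | cons e l ih =>
    intro c
    simp only [List.foldl_cons, List.map_cons, List.prod_cons]
    rw [ih]
    ring

theorem prod_items (u : ℕ) (hu : u ≠ 0) (l : List (Int × Int))
    (hnd : (l.map Prod.fst).Nodup)
    (hent : ∀ pe ∈ l, ∃ q : ℕ, q.Prime ∧ pe.1 = (q : Int) ∧
        pe.2 = (u.factorization q : Int) ∧ 0 < u.factorization q)
    (hcov : ∀ q : ℕ, q.Prime → q ∣ u → ((q : ℕ) : Int) ∈ l.map Prod.fst) :
    (l.map (fun pe => pe.2 + 1)).prod = (u.divisors.card : Int) := by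
  have hmap : l.map (fun pe => pe.2 + 1)
      = (l.map (fun pe => pe.1.toNat)).map (fun q => ((u.factorization q : ℕ) : Int) + 1) := by
    rw [List.map_map]
    refine List.map_congr_left ?_
    intro pe hpe
    obtain ⟨q, _, h1, h2, _⟩ := hent pe hpe
    simp [Function.comp, h1, h2]
  have hks : (l.map (fun pe => pe.1.toNat)).Nodup := by
    have hrw : l.map (fun pe => pe.1.toNat) = (l.map Prod.fst).map Int.toNat := by
      rw [List.map_map]; rfl
    rw [hrw]
    refine List.Nodup.map_on ?_ hnd
    intro x hx y hy hxy
    obtain ⟨px, hpx, hfx⟩ := List.mem_map.mp hx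
    obtain ⟨py, hpy, hfy⟩ := List.mem_map.mp hy
    obtain ⟨qx, _, h1x, _, _⟩ := hent px hpx
    obtain ⟨qy, _, h1y, _, _⟩ := hent py hpy
    rw [← hfx, ← hfy, h1x, h1y] at hxy ⊢
    exact_mod_cast hxy
  have hfin : (l.map (fun pe => pe.1.toNat)).toFinset = u.primeFactors := by
    ext q
    simp only [List.mem_toFinset, Nat.mem_primeFactors]
    constructor
    · intro hq
      obtain ⟨pe, hpe, hft⟩ := List.mem_map.mp hq
      obtain ⟨q', hq', h1, _, h3⟩ := hent pe hpe
      have hqq : q = q' := by rw [← hft, h1]; simp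
      subst hqq
      exact ⟨hq', Nat.dvd_of_factorization_pos (by omega), hu⟩
    · rintro ⟨hq, hdvd, -⟩
      obtain ⟨pe, hpe, hf⟩ := List.mem_map.mp (hcov q hq hdvd)
      exact List.mem_map.mpr ⟨pe, hpe, by rw [hf]; simp⟩
  rw [hmap, ← List.prod_toFinset _ hks, hfin, Nat.card_divisors hu]
  push_cast
  rfl

theorem adjustProd (u : ℕ) (hu0 : u ≠ 0) (hu2 : 2 ∣ u) (D : PySem.Dict Int Int)
    (hent : ∀ pe ∈ D.items, ∃ q : ℕ, q.Prime ∧ pe.1 = (q : Int) ∧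
        pe.2 = (u.factorization q : Int) ∧ 0 < u.factorization q)
    (hcov : ∀ q : ℕ, q.Prime → q ∣ u → ((q : ℕ) : Int) ∈ D.items.map Prod.fst)
    (hnd : (D.items.map Prod.fst).Nodup) :
    (if D.contains 2 then
        (if (D.modify 2 0 (fun v => v - 1)).getD 2 0 = 0
         then (D.modify 2 0 (fun v => v - 1)).erase 2
         else (D.modify 2 0 (fun v => v - 1)))
      else D).values.foldl (fun r e => r * (e + 1)) 1
    = ((u / 2).divisors.card : Int) := by
  have hDnd : D.keys.Nodup := hnd
  set e2 := u.factorization 2 with he2def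
  have he2pos : 0 < e2 := Nat.Prime.factorization_pos_of_dvd Nat.prime_two hu0 hu2
  have hmem2 : (2 : Int) ∈ D.items.map Prod.fst := by
    have := hcov 2 Nat.prime_two hu2
    simpa using this
  have hpe2 : ((2 : Int), (e2 : Int)) ∈ D.items := by
    obtain ⟨pe, hpe, hf⟩ := List.mem_map.mp hmem2
    obtain ⟨q, hq, ha, hb, hcpos⟩ := hent pe hpe
    have hq2 : q = 2 := by
      have : (q : Int) = 2 := by rw [← ha, hf]
      exact_mod_cast this
    subst hq2
    have hp1 : pe.1 = (2 : Int) := hf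
    have hp2 : pe.2 = (e2 : Int) := hb
    have hpe' : pe = ((2 : Int), (e2 : Int)) := Prod.ext_iff.mpr ⟨hp1, hp2⟩
    rwa [hpe'] at hpe
  have hcont2 : D.contains 2 = true := by
    rw [PySem.Dict.contains_iff_mem_keys]
    exact hmem2
  rw [if_pos hcont2]
  have hgetD2 : D.getD 2 0 = (e2 : Int) := PySem.Dict.getD_of_mem_items D hpe2 hDnd 0
  have hmod : D.modify 2 0 (fun v => v - 1) = D.insert 2 ((e2 : Int) - 1) := by
    show D.insert 2 (D.getD 2 0 - 1) = _
    rw [hgetD2]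
  rw [hmod]
  have hm1getD : (D.insert 2 ((e2 : Int) - 1)).getD 2 0 = (e2 : Int) - 1 :=
    PySem.Dict.getD_insert_self D 2 _ 0
  set φ : Int × Int → Int × Int :=
    fun pe => if pe.1 == 2 then (2, (e2 : Int) - 1) else pe with hφ
  have hm1items : (D.insert 2 ((e2 : Int) - 1)).items = D.items.map φ :=
    PySem.Dict.items_insert_of_contains D _ hcont2
  have hφfst : ∀ pe : Int × Int, (φ pe).1 = pe.1 := by
    intro pe
    by_cases h : pe.1 = 2
    · simp [hφ, h]
    · simp [hφ, h]
  have hmapfst : (D.items.map φ).map Prod.fst = D.items.map Prod.fst := by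
    rw [List.map_map]
    exact List.map_congr_left (fun pe _ => hφfst pe)
  set T := u / 2 with hTdef
  have hT0 : T ≠ 0 := by omega
  have hTfact2 : T.factorization 2 = e2 - 1 := by
    rw [hTdef, Nat.factorization_div hu2, Nat.Prime.factorization Nat.prime_two]
    simp
    omega
  have hTfactq : ∀ q : ℕ, q ≠ 2 → T.factorization q = u.factorization q := by
    intro q hqne
    rw [hTdef, Nat.factorization_div hu2, Nat.Prime.factorization Nat.prime_two]
    simp [Ne.symm hqne]
  have hTdvd : T ∣ u := ⟨2, (Nat.div_mul_cancel hu2).symm⟩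
  have hσ : ∀ dd : PySem.Dict Int Int, dd.values.foldl (fun r e => r * (e + 1)) 1
      = (dd.items.map (fun pe => pe.2 + 1)).prod := by
    intro dd
    rw [show dd.values = dd.items.map Prod.snd from rfl, prod_foldl, one_mul, List.map_map]
    rfl
  by_cases he21 : e2 = 1
  · rw [if_pos (by rw [hm1getD, he21]; norm_num)]
    rw [hσ]
    have herase : ((D.insert 2 ((e2 : Int) - 1)).erase 2).items
        = (D.items.map φ).filter (fun pe => !(pe.1 == 2)) := by
      show (D.insert 2 ((e2 : Int) - 1)).items.filter _ = _
      rw [hm1items]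
    rw [herase]
    refine prod_items T hT0 _ ?_ ?_ ?_
    · have hsub : (((D.items.map φ).filter (fun pe => !(pe.1 == 2))).map Prod.fst).Sublist
          ((D.items.map φ).map Prod.fst) := List.Sublist.map Prod.fst List.filter_sublist
      rw [hmapfst] at hsub
      exact hnd.sublist hsub
    · intro pe hpe
      obtain ⟨hpe', hne2⟩ := List.mem_filter.mp hpe
      obtain ⟨pe0, hpe0, hφe⟩ := List.mem_map.mp hpe'
      have hpe0ne : pe0.1 ≠ 2 := by
        intro h
        rw [← hφe] at hne2
        simp [hφ, h] at hne2
      have hid : φ pe0 = pe0 := by simp [hφ, hpe0ne]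
      rw [← hφe, hid]
      obtain ⟨q, hq, ha, hb, hcpos⟩ := hent pe0 hpe0
      have hqne : q ≠ 2 := by
        intro h
        apply hpe0ne
        rw [ha, h]
        norm_num
      exact ⟨q, hq, ha, by rw [hb, hTfactq q hqne], by rw [hTfactq q hqne]; omega⟩
    · intro q hq hdvdT
      have hqne : q ≠ 2 := by
        intro h
        subst h
        have := hq.factorization_pos_of_dvd hT0 hdvdT
        omega
      obtain ⟨pe0, hpe0, hf⟩ := List.mem_map.mp (hcov q hq (hdvdT.trans hTdvd))
      have hpe0ne : pe0.1 ≠ 2 := by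
        rw [hf]
        exact fun h => hqne (by exact_mod_cast h)
      have hid : φ pe0 = pe0 := by simp [hφ, hpe0ne]
      have hmemf : pe0 ∈ (D.items.map φ).filter (fun pe => !(pe.1 == 2)) := by
        refine List.mem_filter.mpr ⟨?_, by simp [hpe0ne]⟩
        exact hid ▸ List.mem_map_of_mem hpe0
      exact List.mem_map.mpr ⟨pe0, hmemf, hf⟩
  · rw [if_neg (by rw [hm1getD]; intro hcc; exact he21 (by omega))]
    rw [hσ, hm1items]
    refine prod_items T hT0 _ ?_ ?_ ?_
    · rw [hmapfst]
      exact hnd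
    · intro pe hpe
      obtain ⟨pe0, hpe0, hφe⟩ := List.mem_map.mp hpe
      by_cases hc : pe0.1 = 2
      · have hpe' : pe = ((2 : Int), (e2 : Int) - 1) := by
          rw [← hφe]
          simp [hφ, hc]
        rw [hpe']
        refine ⟨2, Nat.prime_two, by norm_num, ?_, by rw [hTfact2]; omega⟩
        show (e2 : Int) - 1 = ((T.factorization 2 : ℕ) : Int)
        rw [hTfact2]
        omega
      · have hid : φ pe0 = pe0 := by simp [hφ, hc]
        rw [← hφe, hid]
        obtain ⟨q, hq, ha, hb, hcpos⟩ := hent pe0 hpe0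
        have hqne : q ≠ 2 := by
          intro h
          apply hc
          rw [ha, h]
          norm_num
        exact ⟨q, hq, ha, by rw [hb, hTfactq q hqne], by rw [hTfactq q hqne]; omega⟩
    · intro q hq hdvdT
      rw [hmapfst]
      exact hcov q hq (hdvdT.trans hTdvd)

theorem dT_val (n : Int) (spf : List Int) (h2 : 2 ≤ n)
    (hg : GoodSpf (n.toNat + 1) spf) :
    dT n spf = ((n.toNat * (n.toNat + 1) / 2).divisors.card : Int) := by
  have hnn2 : 2 ≤ n.toNat := by omega
  set nn := n.toNat with hnndef
  have hn : n = (nn : Int) := by omega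
  have hnle : ¬ n ≤ 1 := by omega
  have hA : ∀ m : ℕ, 2 ≤ m → m ≤ nn + 1 →
      ∃ t, (factorWithSpf ((m : ℕ) : Int) spf).items = t ∧
        (∀ pe ∈ t, ∃ q : ℕ, q.Prime ∧ pe.1 = (q : Int) ∧
            pe.2 = (m.factorization q : Int) ∧ 0 < m.factorization q) ∧
        (∀ q : ℕ, q.Prime → q ∣ m → ((q : ℕ) : Int) ∈ t.map Prod.fst) ∧
        (t.map Prod.fst).Nodup := by
    intro m hm2 hmN
    have hgt : ¬ ((m : Int) ≤ 1) := by omega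
    obtain ⟨t, ht, he, hc, hd⟩ := aFactorGo_spec (nn + 1) spf hg m m PySem.Dict.empty
      (by omega) hmN le_rfl (by intro q _ _ hq; simp [PySem.Dict.keys_empty] at hq)
    refine ⟨t, ?_, he, hc, hd⟩
    unfold factorWithSpf
    rw [if_neg hgt, Int.toNat_natCast]
    simpa using ht
  obtain ⟨t1, h1items, h1ent, h1cov, h1nd⟩ := hA nn hnn2 (by omega)
  obtain ⟨t2, h2items, h2ent, h2cov, h2nd⟩ := hA (nn + 1) (by omega) le_rfl
  have h1dvd : ∀ pe ∈ t1, ∃ q : ℕ, q.Prime ∧ pe.1 = (q : Int) ∧ q ∣ nn := by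
    intro pe hpe
    obtain ⟨q, hq, ha, hb, hcpos⟩ := h1ent pe hpe
    exact ⟨q, hq, ha, Nat.dvd_of_factorization_pos (by omega)⟩
  have h2dvd : ∀ pe ∈ t2, ∃ q : ℕ, q.Prime ∧ pe.1 = (q : Int) ∧ q ∣ (nn + 1) := by
    intro pe hpe
    obtain ⟨q, hq, ha, hb, hcpos⟩ := h2ent pe hpe
    exact ⟨q, hq, ha, Nat.dvd_of_factorization_pos (by omega)⟩
  have hdisj : ∀ x ∈ t1.map Prod.fst, x ∉ t2.map Prod.fst := by
    intro x hx1 hx2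
    obtain ⟨p1, hp1, hf1⟩ := List.mem_map.mp hx1
    obtain ⟨p2, hp2, hf2⟩ := List.mem_map.mp hx2
    obtain ⟨q1, hq1, ha1, hd1⟩ := h1dvd p1 hp1
    obtain ⟨q2, hq2, ha2, hd2⟩ := h2dvd p2 hp2
    have hqq : q1 = q2 := by
      have : (q1 : Int) = (q2 : Int) := by rw [← ha1, ← ha2, hf1, hf2]
      exact_mod_cast this
    subst hqq
    exact hq1.ne_one (Nat.dvd_one.mp (by simpa using Nat.dvd_sub hd2 hd1))
  have hfresh : ∀ pe ∈ t2, (factorWithSpf ((nn : ℕ) : Int) spf).contains pe.1 = false := by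
    intro pe hpe
    cases hc : (factorWithSpf ((nn : ℕ) : Int) spf).contains pe.1 with
    | false => rfl
    | true =>
      exfalso
      have hmem := (PySem.Dict.contains_iff_mem_keys _ _).mp hc
      have hkeys : (factorWithSpf ((nn : ℕ) : Int) spf).keys = t1.map Prod.fst := by
        show (factorWithSpf ((nn : ℕ) : Int) spf).items.map Prod.fst = _
        rw [h1items]
      rw [hkeys] at hmem
      exact hdisj pe.1 hmem (List.mem_map_of_mem hpe)
  have hMitems : (t2.foldl (fun d pe => d.insert pe.1 (d.getD pe.1 0 + pe.2))
      (factorWithSpf ((nn : ℕ) : Int) spf)).items = t1 ++ t2 := by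
    rw [merge_items t2 _ hfresh h2nd, h1items]
  have hu0 : nn * (nn + 1) ≠ 0 := Nat.mul_ne_zero (by omega) (by omega)
  have hufact : ∀ q : ℕ, (nn * (nn + 1)).factorization q
      = nn.factorization q + (nn + 1).factorization q := by
    intro q
    rw [Nat.factorization_mul (by omega) (by omega)]
    simp
  have hMent : ∀ pe ∈ t1 ++ t2, ∃ q : ℕ, q.Prime ∧ pe.1 = (q : Int) ∧
      pe.2 = ((nn * (nn + 1)).factorization q : Int) ∧ 0 < (nn * (nn + 1)).factorization q := by
    intro pe hpe
    rcases List.mem_append.mp hpe with h | h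
    · obtain ⟨q, hq, ha, hb, hcpos⟩ := h1ent pe h
      have hd1 : q ∣ nn := Nat.dvd_of_factorization_pos (by omega)
      have hnd2 : ¬ q ∣ (nn + 1) := by
        intro hd2
        exact hq.ne_one (Nat.dvd_one.mp (by simpa using Nat.dvd_sub hd2 hd1))
      have hequ : (nn * (nn + 1)).factorization q = nn.factorization q := by
        rw [hufact, Nat.factorization_eq_zero_of_not_dvd hnd2, add_zero]
      exact ⟨q, hq, ha, by rw [hb, hequ], by omega⟩
    · obtain ⟨q, hq, ha, hb, hcpos⟩ := h2ent pe h
      have hd2 : q ∣ (nn + 1) := Nat.dvd_of_factorization_pos (by omega)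
      have hnd1 : ¬ q ∣ nn := by
        intro hd1
        exact hq.ne_one (Nat.dvd_one.mp (by simpa using Nat.dvd_sub hd2 hd1))
      have hequ : (nn * (nn + 1)).factorization q = (nn + 1).factorization q := by
        rw [hufact, Nat.factorization_eq_zero_of_not_dvd hnd1, zero_add]
      exact ⟨q, hq, ha, by rw [hb, hequ], by omega⟩
  have hMcov : ∀ q : ℕ, q.Prime → q ∣ nn * (nn + 1) →
      ((q : ℕ) : Int) ∈ (t1 ++ t2).map Prod.fst := by
    intro q hq hdvd
    rw [List.map_append]
    rcases hq.dvd_mul.mp hdvd with h | h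
    · exact List.mem_append.mpr (Or.inl (h1cov q hq h))
    · exact List.mem_append.mpr (Or.inr (h2cov q hq h))
  have hMnd : ((t1 ++ t2).map Prod.fst).Nodup := by
    rw [List.map_append]
    exact h1nd.append h2nd (List.disjoint_left.mpr hdisj)
  have h2dvdu : 2 ∣ nn * (nn + 1) := (Nat.even_mul_succ_self nn).two_dvd
  simp only [dT, if_neg hnle]
  rw [hn, show ((nn : Int) + 1) = (((nn + 1) : ℕ) : Int) by push_cast; ring, h2items]
  exact adjustProd (nn * (nn + 1)) hu0 h2dvdu _
    (by rw [hMitems]; exact hMent)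
    (by intro q hq hdvd; rw [hMitems]; exact hMcov q hq hdvd)
    (by rw [hMitems]; exact hMnd)

theorem dT_alt_val (n : Int) (spf : List Int) (h2 : 2 ≤ n)
    (hg : GoodSpf (n.toNat + 1) spf) :
    dT_alt n spf = ((n.toNat * (n.toNat + 1) / 2).divisors.card : Int) := by
  have hnn2 : 2 ≤ n.toNat := by omega
  set nn := n.toNat with hnndef
  have hn : n = (nn : Int) := by omega
  have hnle : ¬ n ≤ 1 := by omega
  have hcopnn : Nat.Coprime nn (nn + 1) := by
    show Nat.gcd nn (nn + 1) = 1
    rw [Nat.gcd_self_add_right]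
    exact Nat.gcd_one_right nn
  have hdc : ∀ m : ℕ, 1 ≤ m → m ≤ nn + 1 → divisorCountB ((m : ℕ) : Int) spf
      = ((m.divisors.card : ℕ) : Int) := by
    intro m h1 hmN
    unfold divisorCountB
    rw [show (((m : ℕ) : Int)).toNat = m from Int.toNat_natCast m,
      bCountGo_spec (nn + 1) spf hg m m 1 h1 hmN le_rfl, one_mul]
  have hmod2 : PySem.Int.mod n 2 = ((nn % 2 : ℕ) : Int) := by
    rw [hn]; exact_mod_cast PySem.Int.mod_natCast nn 2
  have hfd : PySem.Int.floordiv n 2 = ((nn / 2 : ℕ) : Int) := by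
    rw [hn]; exact_mod_cast PySem.Int.floordiv_natCast nn 2
  have hfd1 : PySem.Int.floordiv (n + 1) 2 = (((nn + 1) / 2 : ℕ) : Int) := by
    rw [hn, show ((nn : Int) + 1) = (((nn + 1) : ℕ) : Int) by push_cast; ring]
    exact_mod_cast PySem.Int.floordiv_natCast (nn + 1) 2
  simp only [dT_alt, if_neg hnle]
  by_cases hpar : nn % 2 = 0
  · rw [if_pos (by rw [hmod2, hpar]; rfl), hfd,
      show (n + 1) = (((nn + 1) : ℕ) : Int) by rw [hn]; push_cast; ring]
    rw [hdc (nn / 2) (by omega) (by omega), hdc (nn + 1) (by omega) le_rfl]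
    obtain ⟨k, hk⟩ := Nat.dvd_of_mod_eq_zero hpar
    have hk2 : nn / 2 = k := by omega
    have hmulT : nn * (nn + 1) = 2 * (k * (nn + 1)) := by rw [hk]; ring
    have hT : nn * (nn + 1) / 2 = k * (nn + 1) := by
      rw [hmulT, Nat.mul_div_cancel_left _ (by norm_num)]
    have hcop : Nat.Coprime k (nn + 1) :=
      Nat.Coprime.coprime_dvd_left ⟨2, by omega⟩ hcopnn
    rw [hk2, hT, Nat.Coprime.card_divisors_mul hcop]
    push_cast
    ring
  · rw [if_neg (by rw [hmod2]; intro hc; exact hpar (by exact_mod_cast hc)), hfd1, hn]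
    rw [hdc nn (by omega) (by omega), hdc ((nn + 1) / 2) (by omega) (by omega)]
    have h2d : 2 ∣ nn + 1 := by omega
    obtain ⟨k, hk⟩ := h2d
    have hk2 : (nn + 1) / 2 = k := by omega
    have hmulT : nn * (nn + 1) = 2 * (nn * k) := by rw [hk]; ring
    have hT : nn * (nn + 1) / 2 = nn * k := by
      rw [hmulT, Nat.mul_div_cancel_left _ (by norm_num)]
    have hcop : Nat.Coprime nn k :=
      Nat.Coprime.coprime_dvd_right ⟨2, by omega⟩ hcopnn
    rw [hk2, hT, Nat.Coprime.card_divisors_mul hcop]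
    push_cast
    ring

-- ===== VERDICT (by name: the statement is the Claim_ definition above) =====
theorem dT_spec : Claim_equal_dT := by
  intro n spf _ hpre
  unfold Spec_dT
  by_cases hn : n ≤ 1
  · simp [dT, dT_alt, hn]
  · have h2 : 2 ≤ n := by omega
    have hg : GoodSpf (n.toNat + 1) spf := by
      rcases hpre with h | ⟨hlen, h⟩
      · omega
      · intro i hi2 hiN
        obtain ⟨ha, hb, hc⟩ := h i (by omega) hi2
        exact ⟨by omega, ha, hb, hc⟩
    rw [dT_val n spf h2 hg, dT_alt_val n spf h2 hg]
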